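-- pv_equiv track=rewrite | github.com/Mirrowel/AOE-Tools | launcher/core/network.py | _get_sorted_urls
-- ===== SOURCE A (Python) =====
-- from typing import List, Dict, Optional, Callable
--
-- def _get_sorted_urls(urls: Dict[str, str]) -> List[tuple[str, str]]:
--     """Sorts URLs to prioritize 'GitHub Git'."""
--     sorted_urls = []
--     if "GitHub Git" in urls:
--         sorted_urls.append(("GitHub Git", urls["GitHub Git"]))
--         for provider, url in urls.items():
--             if provider != "GitHub Git":
--                 sorted_urls.append((provider, url))
--     else:
--         sorted_urls = list(urls.items())
--     return sorted_urls
-- ===== SOURCE B (Python) =====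
-- from typing import List, Dict
--
-- def _get_sorted_urls(urls: Dict[str, str]) -> List[tuple[str, str]]:
--     """Sorts URLs to prioritize 'GitHub Git'."""
--     return sorted(urls.items(), key=lambda kv: kv[0] != "GitHub Git")
-- ===== Notes on version B (the rewrite author's own statement) =====
-- stated objective: idiomatic
-- what changed: Replaces the membership test plus manual append loop with a single stable sort keyed by the boolean predicate key != 'GitHub Git', which moves the unique 'GitHub Git' entry to the front and preserves insertion order otherwise.
import Mathlib
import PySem

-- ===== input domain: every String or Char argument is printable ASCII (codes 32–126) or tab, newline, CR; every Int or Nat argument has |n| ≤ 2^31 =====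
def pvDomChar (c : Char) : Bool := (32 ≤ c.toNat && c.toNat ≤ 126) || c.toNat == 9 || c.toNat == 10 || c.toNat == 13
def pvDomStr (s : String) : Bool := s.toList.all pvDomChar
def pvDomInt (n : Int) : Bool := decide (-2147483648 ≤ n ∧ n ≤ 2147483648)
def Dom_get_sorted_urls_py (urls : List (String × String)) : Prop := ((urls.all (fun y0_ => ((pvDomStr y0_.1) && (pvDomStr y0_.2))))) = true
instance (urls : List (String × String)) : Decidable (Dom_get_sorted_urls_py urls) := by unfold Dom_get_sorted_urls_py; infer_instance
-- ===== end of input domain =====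

-- B replaces A's membership test + append loop with one stable sort keyed by
-- the boolean predicate (key ≠ "GitHub Git"); equally fast, more idiomatic.

-- ===== PORT A =====
-- "GitHub Git" in urls / urls["GitHub Git"]: dict lookup = first match in the association list
def get_sorted_urls_py (urls : List (String × String)) : List (String × String) :=
  match PySem.Dict.get? (PySem.Dict.mk urls) "GitHub Git" with
  | some v =>
      -- sorted_urls = [("GitHub Git", v)]; for provider, url in urls.items(): if provider != "GitHub Git": append
      urls.foldl (fun acc p => if p.1 ≠ "GitHub Git" then acc ++ [p] else acc)
        [("GitHub Git", v)]
  | none => urls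

-- ===== PORT B =====
def get_sorted_urls_py_alt (urls : List (String × String)) : List (String × String) :=
  PySem.List.sorted urls (fun kv => kv.1 != "GitHub Git") false

-- ===== PRECONDITION & SPEC =====
-- A's argument is a Python dict, whose keys are distinct; Pre_ only states that the
-- association list carries at most one "GitHub Git" entry (every real dict satisfies it).
def Pre_get_sorted_urls_py (urls : List (String × String)) : Prop :=
  (urls.map Prod.fst).count "GitHub Git" ≤ 1
instance (urls : List (String × String)) : Decidable (Pre_get_sorted_urls_py urls) := by
  unfold Pre_get_sorted_urls_py; infer_instance
def pvWitness_get_sorted_urls_py : (List (String × String)) :=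
  [("SourceForge", "https://sf.net"), ("GitHub Git", "https://github.com")]
def Spec_get_sorted_urls_py (urls : List (String × String)) (out : List (String × String)) : Prop := out = get_sorted_urls_py_alt urls
instance (urls : List (String × String)) (out : List (String × String)) : Decidable (Spec_get_sorted_urls_py urls out) := by unfold Spec_get_sorted_urls_py; infer_instance

-- ===== CLAIM (what is proved, stated in full; the proofs are below) =====
def Claim_equal_get_sorted_urls_py : Prop := ∀ (urls : List (String × String)), Dom_get_sorted_urls_py urls → Pre_get_sorted_urls_py urls → Spec_get_sorted_urls_py urls (get_sorted_urls_py urls)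

-- ===== LEMMAS AND PROOFS =====

-- inserting x into F ++ T, where x goes after every element of F and before the head of T
theorem insertBy_split {α : Type} (before : α → α → Bool) (x : α) (F T : List α)
    (hF : ∀ y ∈ F, before x y = false)
    (hT : ∀ t ∈ T.head?, before x t = true) :
    PySem.List.insertBy before x (F ++ T) = F ++ x :: T := by
  induction F with
  | nil =>
      cases T with
      | nil => simp [PySem.List.insertBy]
      | cons t ts => simp [PySem.List.insertBy, hT t rfl]
  | cons y ys ih =>
      have hy : before x y = false := hF y (by simp)
      simp [PySem.List.insertBy, hy, ih (fun z hz => hF z (by simp [hz]))]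

-- a stable sort on a Bool key is the stable partition: false-keyed elements first
theorem sorted_bool_key_eq_partition {α : Type} (key : α → Bool) (l : List α) :
    PySem.List.sorted l key false =
      l.filter (fun x => !key x) ++ l.filter key := by
  rw [PySem.List.sorted_eq_foldl_insertBy]
  suffices h : ∀ (l F T : List α), (∀ y ∈ F, key y = false) → (∀ y ∈ T, key y = true) →
      l.foldl (fun acc x => PySem.List.insertBy (fun a b => decide (key a < key b)) x acc) (F ++ T)
        = (F ++ l.filter (fun x => !key x)) ++ (T ++ l.filter key) by
    simpa using h l [] [] (by simp) (by simp)
  intro l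
  induction l with
  | nil => intro F T _ _; simp
  | cons x xs ih =>
      intro F T hF hT
      by_cases hx : key x = true
      · have : PySem.List.insertBy (fun a b => decide (key a < key b)) x (F ++ T)
            = (F ++ T) ++ [x] := by
          have := insertBy_split (fun a b => decide (key a < key b)) x (F ++ T) []
            (by intro y hy; rcases List.mem_append.1 hy with h | h
                · simp [hF y h, hx]
                · simp [hT y h, hx])
            (by intro t ht; simp at ht)
          simpa using this
        rw [List.foldl_cons, this, List.append_assoc, ← List.append_assoc]
        have := ih F (T ++ [x]) hF
          (by intro y hy; rcases List.mem_append.1 hy with h | h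
              · exact hT y h
              · simp at h; subst h; exact hx)
        simp only [List.append_assoc] at this ⊢
        rw [this]
        simp [hx]
      · have hxf : key x = false := by simpa using hx
        have hins : PySem.List.insertBy (fun a b => decide (key a < key b)) x (F ++ T)
            = F ++ x :: T := by
          exact insertBy_split _ x F T
            (by intro y hy; simp [hF y hy, hxf])
            (by intro t ht
                have : t ∈ T := List.mem_of_mem_head? ht
                simp [hT t this, hxf, Bool.lt_iff])
        rw [List.foldl_cons, hins]
        have := ih (F ++ [x]) T
          (by intro y hy; rcases List.mem_append.1 hy with h | h
              · exact hF y h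
              · simp at h; subst h; exact hxf) hT
        simp only [List.append_assoc, List.singleton_append] at this ⊢
        rw [this]
        simp [hxf]

-- dict lookup on the assoc list: none ↔ no entry has the key
theorem get?_none_iff (urls : List (String × String)) :
    PySem.Dict.get? (PySem.Dict.mk urls) "GitHub Git" = none ↔
      ∀ p ∈ urls, p.1 ≠ "GitHub Git" := by
  induction urls with
  | nil => simp [PySem.Dict.get?]
  | cons q qs ih =>
      rw [PySem.Dict.get?_mk_cons]
      by_cases hq : q.1 = "GitHub Git" <;> simp [hq, ih]

-- with at most one "GitHub Git" key, the matching entries are exactly the pair get? returns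
theorem filter_eq_of_get?_some (urls : List (String × String)) (v : String)
    (hg : PySem.Dict.get? (PySem.Dict.mk urls) "GitHub Git" = some v)
    (hpre : (urls.map Prod.fst).count "GitHub Git" ≤ 1) :
    urls.filter (fun x => decide (x.1 = "GitHub Git")) = [("GitHub Git", v)] := by
  induction urls with
  | nil => simp [PySem.Dict.get?] at hg
  | cons q qs ih =>
      rw [PySem.Dict.get?_mk_cons] at hg
      by_cases hq : q.1 = "GitHub Git"
      · simp [hq] at hg
        have hcount : (qs.map Prod.fst).count "GitHub Git" = 0 := by
          simp [hq] at hpre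
          omega
        have hnone : qs.filter (fun x => decide (x.1 = "GitHub Git")) = [] := by
          rw [List.filter_eq_nil_iff]; intro p hp hc
          have hm : p.1 ∈ qs.map Prod.fst := List.mem_map_of_mem hp
          simp at hc
          rw [hc] at hm
          exact absurd (List.count_pos_iff.2 hm) (by omega)
        have hqpair : q = ("GitHub Git", v) := by
          obtain ⟨q1, q2⟩ := q; simp at hq hg; simp [hq, hg]
        simp [hnone, hqpair]
      · simp [hq] at hg
        have hpre' : (qs.map Prod.fst).count "GitHub Git" ≤ 1 := by
          simp [List.count_cons] at hpre
          omega
        simp [hq, ih hg hpre']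

-- ===== VERDICT (by name: the statement is the Claim_ definition above) =====
theorem get_sorted_urls_py_spec : Claim_equal_get_sorted_urls_py := by
  intro urls _ hpre
  unfold Spec_get_sorted_urls_py get_sorted_urls_py get_sorted_urls_py_alt
  rw [sorted_bool_key_eq_partition]
  cases hg : PySem.Dict.get? (PySem.Dict.mk urls) "GitHub Git" with
  | none =>
      have hall := (get?_none_iff urls).1 hg
      have h1 : urls.filter (fun x => !(x.1 != "GitHub Git")) = [] := by
        rw [List.filter_eq_nil_iff]; intro p hp; simp [hall p hp]
      have h2 : urls.filter (fun x => x.1 != "GitHub Git") = urls := by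
        rw [List.filter_eq_self]; intro p hp; simp [hall p hp]
      simp [h1, h2]
  | some v =>
      show List.foldl (fun acc p => if p.1 ≠ "GitHub Git" then acc ++ [p] else acc) [("GitHub Git", v)] urls = _
      rw [PySem.List.foldl_append_ite_eq_filter]
      have hfalse : urls.filter (fun x => !(x.1 != "GitHub Git"))
          = urls.filter (fun x => decide (x.1 = "GitHub Git")) := by
        apply List.filter_congr; intro p _
        by_cases h : p.1 = "GitHub Git" <;> simp [h]
      have hne : urls.filter (fun x => decide (x.1 ≠ "GitHub Git"))
          = urls.filter (fun x => x.1 != "GitHub Git") := by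
        apply List.filter_congr; intro p _
        by_cases h : p.1 = "GitHub Git" <;> simp [h]
      rw [hfalse, filter_eq_of_get?_some urls v hg hpre, hne]
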